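-- pv_equiv track=rewrite | github.com/hugolundin/dailyprogrammer | python/easy/228.py | is_reversed
-- ===== SOURCE A (Python) =====
-- def is_reversed(word: str) -> bool:
--     for w in range(len(word)):
--         if w == 0:
--             continue
--
--         w1 = ord(word[w - 1])
--         w2 = ord(word[w])
--
--         if w1 < w2:
--             return False
--
--     return True
-- ===== SOURCE B (Python) =====
-- def is_reversed(word: str) -> bool:
--     return list(word) == sorted(word, reverse=True)
-- ===== Notes on version B (the rewrite author's own statement) =====
-- stated objective: idiomatic
-- what changed: Replaces the index-based early-exit adjacent-pair scan with a sort-and-compare: the word equals its descending-sorted form iff its characters are non-increasing.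
import Mathlib
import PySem

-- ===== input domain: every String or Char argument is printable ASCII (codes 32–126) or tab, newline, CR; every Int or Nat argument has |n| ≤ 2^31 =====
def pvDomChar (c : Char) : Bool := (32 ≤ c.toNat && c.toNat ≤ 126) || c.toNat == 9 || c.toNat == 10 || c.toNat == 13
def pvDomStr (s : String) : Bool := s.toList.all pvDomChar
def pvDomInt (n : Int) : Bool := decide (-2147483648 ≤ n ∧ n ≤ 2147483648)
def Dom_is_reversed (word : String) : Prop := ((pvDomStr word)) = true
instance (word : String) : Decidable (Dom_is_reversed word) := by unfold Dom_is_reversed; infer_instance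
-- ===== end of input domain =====

-- B replaces A's index-based early-exit adjacent-pair scan by the idiomatic
-- sort-and-compare: the word equals its descending-sorted form iff non-increasing.

-- ===== PORT A =====
-- the loop body of A over the remaining indices of range(len(word));
-- the index w is always in range, so the .getD ' ' defaults are never used
def isRevGo (cs : List Char) : List Int → Bool
  | [] => true
  | w :: rest =>
    if w = 0 then isRevGo cs rest
    else
      let w1 := ((PySem.List.pyGet? cs (w - 1)).getD ' ').toNat
      let w2 := ((PySem.List.pyGet? cs w).getD ' ').toNat
      if w1 < w2 then false else isRevGo cs rest

def is_reversed (word : String) : Bool :=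
  isRevGo word.toList (PySem.List.pyRange 0 word.toList.length 1)

-- ===== PORT B =====
def is_reversed_alt (word : String) : Bool :=
  word.toList == PySem.List.sorted word.toList (fun c => c.toNat) true

-- ===== PRECONDITION & SPEC =====
def Spec_is_reversed (word : String) (out : Bool) : Prop := out = is_reversed_alt word
instance (word : String) (out : Bool) : Decidable (Spec_is_reversed word out) := by unfold Spec_is_reversed; infer_instance

-- ===== CLAIM (what is proved, stated in full; the proofs are below) =====
def Claim_equal_is_reversed : Prop := ∀ (word : String), Dom_is_reversed word → Spec_is_reversed word (is_reversed word)

-- ===== LEMMAS AND PROOFS =====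

lemma isRevGo_iff (cs : List Char) (idxs : List Int) :
    isRevGo cs idxs = true ↔
      ∀ w ∈ idxs, w ≠ 0 →
        ((PySem.List.pyGet? cs w).getD ' ').toNat ≤ ((PySem.List.pyGet? cs (w - 1)).getD ' ').toNat := by
  induction idxs with
  | nil => simp [isRevGo]
  | cons w rest ih =>
    by_cases hw : w = 0
    · simp [isRevGo, hw, ih]
    · simp only [isRevGo, if_neg hw]
      split_ifs with hlt
      · simp only [false_iff]
        intro h
        exact absurd (h w (by simp) hw) (by omega)
      · rw [ih]
        constructor
        · rintro h x hx hx0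
          rcases List.mem_cons.1 hx with rfl | hx'
          · omega
          · exact h x hx' hx0
        · intro h x hx hx0
          exact h x (List.mem_cons_of_mem _ hx) hx0

lemma a_eq_chain (word : String) :
    is_reversed word = true ↔
      List.IsChain (fun a b : Char => b.toNat ≤ a.toNat) word.toList := by
  rw [is_reversed, isRevGo_iff, List.isChain_iff_getElem]
  constructor
  · intro h i hi
    have h1 : (0 : Int) ≤ (i : Int) + 1 := by omega
    have h2 : (i : Int) + 1 < word.toList.length := by exact_mod_cast (by omega : (i : Int) + 1 < (word.toList.length : Int))
    have := h ((i : Int) + 1)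
      ((PySem.List.mem_pyRange_one).2 ⟨by omega, h2⟩) (by omega)
    rw [PySem.List.pyGet?_eq_some_getElem _ h1 h2,
        PySem.List.pyGet?_eq_some_getElem _ (by omega) (by omega)] at this
    simp only [Option.getD_some] at this
    convert this using 3 <;> omega
  · intro h w hw hw0
    rcases (PySem.List.mem_pyRange_one).1 hw with ⟨hw1, hw2⟩
    have hw1' : (1 : Int) ≤ w := by omega
    rw [PySem.List.pyGet?_eq_some_getElem _ (by omega) hw2,
        PySem.List.pyGet?_eq_some_getElem _ (by omega) (by omega)]
    simp only [Option.getD_some]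
    have hidx : w.toNat - 1 + 1 < word.toList.length := by omega
    have := h (w.toNat - 1) hidx
    convert this using 3 <;> omega

lemma alt_eq_chain (word : String) :
    is_reversed_alt word = true ↔
      List.IsChain (fun a b : Char => b.toNat ≤ a.toNat) word.toList := by
  rw [is_reversed_alt, beq_iff_eq]
  constructor
  · intro h
    have hp := PySem.List.sorted_pairwise_rev word.toList (fun c => c.toNat)
    rw [← h] at hp
    exact hp.isChain
  · intro h
    have hp : word.toList.Pairwise (fun a b : Char => (fun c => c.toNat) b ≤ (fun c => c.toNat) a) := by
      haveI : Trans (fun a b : Char => b.toNat ≤ a.toNat) (fun a b : Char => b.toNat ≤ a.toNat)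
          (fun a b : Char => b.toNat ≤ a.toNat) := ⟨fun h1 h2 => le_trans h2 h1⟩
      exact (List.isChain_iff_pairwise (R := fun a b : Char => b.toNat ≤ a.toNat)).1 h
    exact (PySem.List.sorted_rev_eq_self_of_pairwise word.toList (fun c => c.toNat) hp).symm

-- ===== VERDICT (by name: the statement is the Claim_ definition above) =====
theorem is_reversed_spec : Claim_equal_is_reversed := by
  intro word _
  unfold Spec_is_reversed
  rw [Bool.eq_iff_iff, a_eq_chain, alt_eq_chain]
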